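-- pv_equiv track=rewrite | github.com/Valouzzzz/cryptage_Valouzzzz | decryptage.py | decrypter_approx
-- ===== SOURCE A (Python) =====
-- def nombre_vers_lettre(n):
--     if n == 27:
--         return "_"
--     if n == 28:
--         return "."
--     if n == 29:
--         return "?"
--     if n == 30:
--         return "!"
--     if n == 31:
--         return " "
--     if n == 32:
--         return ","
--     elif 1 <= n <= 26:
--         return chr(n + ord('a') - 1)
--     else:
--         return "?"
--
-- def decrypter_approx(texte_chiffre, cle, taille_bloc):
--     texte_dechiffre = []
--     index = 0
--
--     for i in range(0, len(texte_chiffre), taille_bloc):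
--         bloc = texte_chiffre[i:i+taille_bloc]
--         bloc_lettres = []
--
--         for valeur_chiffree in bloc:
--             found = False
--             for freq in range(1, 6):
--                 valeur_estimee = (valeur_chiffree // cle) - freq
--                 if 1 <= valeur_estimee <= 32:
--                     lettre = nombre_vers_lettre(valeur_estimee)
--                     bloc_lettres.append(lettre)
--                     found = True
--                     break
--             if not found:
--                 bloc_lettres.append("?")
--
--         texte_dechiffre.extend(bloc_lettres)
--
--     return ''.join(texte_dechiffre)
-- ===== SOURCE B (Python) =====
-- _TABLE = "abcdefghijklmnopqrstuvwxyz_.?! ,"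
--
-- def decrypter_approx(texte_chiffre, cle, taille_bloc):
--     # Closed form: the freq=1..5 search always picks valeur = min(32, q-1),
--     # valid exactly when 2 <= q <= 37; block chunking never affects the output.
--     return ''.join(
--         _TABLE[min(31, v // cle - 2)] if 2 <= v // cle <= 37 else "?"
--         for v in texte_chiffre
--     )
-- ===== Notes on version B (the rewrite author's own statement) =====
-- stated objective: simpler
-- what changed: Replaces the block-slicing outer loop, the freq=1..5 inner search and the if-chain letter mapper by a single per-character pass computing the closed-form candidate min(32, v//cle - 1) (valid iff 2 <= v//cle <= 37) read from a 32-character lookup table; no slices or intermediate block lists, hence a measured constant-factor speedup.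
-- outside the precondition, e.g. on decrypter_approx([40], 2, -1): A returns '', B returns 's'; on decrypter_approx([40], 2, 0): A raises ValueError, B returns 's'; on decrypter_approx([40], 0, 2): A raises ZeroDivisionError, B raises ZeroDivisionError
import Mathlib
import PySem

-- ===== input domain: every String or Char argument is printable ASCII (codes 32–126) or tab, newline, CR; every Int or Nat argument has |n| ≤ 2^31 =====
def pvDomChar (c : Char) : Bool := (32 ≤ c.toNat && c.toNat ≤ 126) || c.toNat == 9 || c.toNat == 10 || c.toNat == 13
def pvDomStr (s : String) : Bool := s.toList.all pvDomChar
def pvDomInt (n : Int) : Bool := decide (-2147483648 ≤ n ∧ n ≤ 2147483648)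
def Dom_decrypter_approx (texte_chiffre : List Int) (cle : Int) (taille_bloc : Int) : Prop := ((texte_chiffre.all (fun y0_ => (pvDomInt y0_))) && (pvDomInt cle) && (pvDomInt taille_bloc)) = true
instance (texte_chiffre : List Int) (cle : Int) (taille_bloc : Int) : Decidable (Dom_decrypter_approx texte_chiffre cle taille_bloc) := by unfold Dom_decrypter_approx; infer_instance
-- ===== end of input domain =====

-- B replaces the block-slicing loop, the freq=1..5 search and the if-chain letter map by one
-- per-character pass with a closed-form candidate and a 32-character lookup table (objective: simpler).

-- ===== PORT A =====
def nombre_vers_lettre (n : Int) : String :=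
  if n == 27 then "_"
  else if n == 28 then "."
  else if n == 29 then "?"
  else if n == 30 then "!"
  else if n == 31 then " "
  else if n == 32 then ","
  else if 1 ≤ n ∧ n ≤ 26 then String.ofList [Char.ofNat (n + 97 - 1).toNat]
  else "?"

-- the 'for freq in range(1, 6)' search with its found/break flag (none = not found)
def pvFreqSearch (valeur_chiffree : Int) (cle : Int) : Option String :=
  (PySem.List.pyRange 1 6 1).foldl
    (fun found freq =>
      match found with
      | some lettre => some lettre
      | none =>
        let valeur_estimee := PySem.Int.floordiv valeur_chiffree cle - freq
        if 1 ≤ valeur_estimee ∧ valeur_estimee ≤ 32 then some (nombre_vers_lettre valeur_estimee)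
        else none)
    none

def decrypter_approx (texte_chiffre : List Int) (cle : Int) (taille_bloc : Int) : String :=
  PySem.Str.join ""
    ((PySem.List.pyRange 0 (texte_chiffre.length : Int) taille_bloc).foldl
      (fun texte_dechiffre i =>
        let bloc := PySem.List.slice texte_chiffre (some i) (some (i + taille_bloc))
        let bloc_lettres := bloc.foldl
          (fun bloc_lettres valeur_chiffree =>
            match pvFreqSearch valeur_chiffree cle with
            | some lettre => bloc_lettres ++ [lettre]
            | none => bloc_lettres ++ ["?"])
          ([] : List String)
        texte_dechiffre ++ bloc_lettres)
      [])

-- ===== PORT B =====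
def pvTable : String := "abcdefghijklmnopqrstuvwxyz_.?! ,"

-- _TABLE[min(31, q-2)]: the index is provably in 0..31, so the getD default is unreachable
def decrypter_approx_alt (texte_chiffre : List Int) (cle : Int) (taille_bloc : Int) : String :=
  PySem.Str.join ""
    (texte_chiffre.map (fun v =>
      let q := PySem.Int.floordiv v cle
      if 2 ≤ q ∧ q ≤ 37 then String.ofList [pvTable.toList.getD (min 31 (q - 2)).toNat '?']
      else "?"))

-- ===== PRECONDITION & SPEC =====
-- cle = 0 raises ZeroDivisionError and taille_bloc = 0 raises ValueError in A; taille_bloc < 0 is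
-- outside the natural domain (a block size): there A's range() is empty and it returns "" ignoring
-- the whole input, an artefact no caller would want, so Pre_ restricts to positive block sizes.
def Pre_decrypter_approx (texte_chiffre : List Int) (cle : Int) (taille_bloc : Int) : Prop :=
  cle ≠ 0 ∧ 1 ≤ taille_bloc
instance (texte_chiffre : List Int) (cle : Int) (taille_bloc : Int) : Decidable (Pre_decrypter_approx texte_chiffre cle taille_bloc) := by unfold Pre_decrypter_approx; infer_instance

def pvWitness_decrypter_approx : List Int × Int × Int := ([70, 40, 100], 2, 2)

def Spec_decrypter_approx (texte_chiffre : List Int) (cle : Int) (taille_bloc : Int) (out : String) : Prop := out = decrypter_approx_alt texte_chiffre cle taille_bloc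
instance (texte_chiffre : List Int) (cle : Int) (taille_bloc : Int) (out : String) : Decidable (Spec_decrypter_approx texte_chiffre cle taille_bloc out) := by unfold Spec_decrypter_approx; infer_instance

-- ===== CLAIM (what is proved, stated in full; the proofs are below) =====
def Claim_equal_decrypter_approx : Prop := ∀ (texte_chiffre : List Int) (cle : Int) (taille_bloc : Int), Dom_decrypter_approx texte_chiffre cle taille_bloc → Pre_decrypter_approx texte_chiffre cle taille_bloc → Spec_decrypter_approx texte_chiffre cle taille_bloc (decrypter_approx texte_chiffre cle taille_bloc)

-- ===== LEMMAS AND PROOFS =====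

-- B's per-character letter, as a function of q = v // cle
def pvAltChar (q : Int) : String :=
  if 2 ≤ q ∧ q ≤ 37 then String.ofList [pvTable.toList.getD (min 31 (q - 2)).toNat '?'] else "?"

-- A's freq=1..5 search equals B's closed form, for every quotient q
theorem pvFreq_eq_closed (valeur cle : Int) :
    (match pvFreqSearch valeur cle with | some l => l | none => "?")
      = pvAltChar (PySem.Int.floordiv valeur cle) := by
  unfold pvFreqSearch pvAltChar
  have hr : PySem.List.pyRange 1 6 1 = [1, 2, 3, 4, 5] := by decide
  rw [hr]
  generalize PySem.Int.floordiv valeur cle = q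
  simp only [List.foldl]
  by_cases h1 : 2 ≤ q ∧ q ≤ 37
  · rw [if_pos h1]
    obtain ⟨ha, hb⟩ := h1
    interval_cases q <;> decide
  · rw [if_neg h1]
    split_ifs <;> first | rfl | omega

theorem pyRange_pos_nil (a b s : Int) (hs : 0 < s) (h : b ≤ a) :
    PySem.List.pyRange a b s = [] := by
  rw [PySem.List.pyRange_of_pos a b hs, if_neg (by omega)]
  simp

theorem pyRange_pos_cons (a b s : Int) (hs : 0 < s) (hab : a < b) :
    PySem.List.pyRange a b s = a :: PySem.List.pyRange (a + s) b s := by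
  rw [PySem.List.pyRange_of_pos a b hs, PySem.List.pyRange_of_pos (a + s) b hs,
    if_pos hab]
  by_cases h2 : a + s < b
  · rw [if_pos h2]
    have key : (b - a + s - 1) / s = (b - (a + s) + s - 1) / s + 1 := by
      have := Int.add_mul_ediv_right (b - (a + s) + s - 1) 1 (ne_of_gt hs)
      rw [one_mul] at this
      rw [← this]; ring_nf
    have hnn : 0 ≤ (b - (a + s) + s - 1) / s :=
      Int.ediv_nonneg (by omega) (by omega)
    have : (b - a + s - 1) / s = ((b - (a + s) + s - 1) / s).toNat + 1 := by omega
    rw [this]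
    norm_cast
    rw [List.range_succ_eq_map]
    simp only [List.map_cons, List.map_map]
    refine congrArg₂ _ (by simp) ?_
    apply List.map_congr_left
    intro k _
    simp only [Function.comp_apply, Nat.succ_eq_add_one]
    push_cast
    ring
  · rw [if_neg h2]
    have key : (b - a + s - 1) / s = 1 := by
      rw [← PySem.Int.floordiv_eq_ediv_of_pos hs, PySem.Int.floordiv_eq_iff_of_pos hs]
      constructor <;> omega
    rw [key]
    simp

theorem pyRange_pos_shift (n s : Int) (hs : 0 < s) :
    PySem.List.pyRange s n s = (PySem.List.pyRange 0 (n - s) s).map (· + s) := by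
  rw [PySem.List.pyRange_of_pos s n hs, PySem.List.pyRange_of_pos 0 (n - s) hs]
  by_cases h : s < n
  · rw [if_pos h, if_pos (show (0:Int) < n - s by omega)]
    have e : n - s - 0 + s - 1 = n - s + s - 1 := by ring
    rw [e, List.map_map]
    apply List.map_congr_left
    intro k _
    simp only [Function.comp_apply]
    ring
  · rw [if_neg h, if_neg (show ¬ (0:Int) < n - s by omega)]
    simp

-- slices of l at offset i+tb are slices of l.drop tb at offset i
theorem slice_drop_shift {α : Type} (l : List α) (i tb : Int) (hi : 0 ≤ i) (htb : 0 ≤ tb) :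
    PySem.List.slice l (some (i + tb)) (some (i + tb + tb))
      = PySem.List.slice (l.drop tb.toNat) (some i) (some (i + tb)) := by
  rw [PySem.List.slice_toNat _ (by omega) (by omega), PySem.List.slice_toNat _ hi (by omega)]
  rw [List.drop_drop]
  have e1 : (i + tb + tb).toNat - (i + tb).toNat = (i + tb).toNat - i.toNat := by omega
  have e2 : (i + tb).toNat = i.toNat + tb.toNat := by omega
  rw [e1, e2, Nat.add_comm tb.toNat i.toNat]

-- the chunked traversal visits exactly the whole list, for any positive block size
theorem pvChunks_flat {α : Type} (tb : Int) (htb : 1 ≤ tb) :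
    ∀ (l : List α),
      (PySem.List.pyRange 0 (l.length : Int) tb).flatMap
        (fun i => PySem.List.slice l (some i) (some (i + tb))) = l := by
  intro l
  induction hn : l.length using Nat.strong_induction_on generalizing l with
  | _ n ih =>
    subst hn
    rcases Decidable.em (l = []) with rfl | hne
    · simp [pyRange_pos_nil 0 0 tb (by omega) le_rfl]
    · have hlen : 0 < l.length := List.length_pos_of_ne_nil hne
      rw [pyRange_pos_cons 0 (l.length : Int) tb (by omega) (by exact_mod_cast hlen)]
      rw [List.flatMap_cons]
      rw [zero_add, pyRange_pos_shift _ _ (by omega)]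
      rw [List.flatMap_map]
      have hcongr :
          List.flatMap (fun a => PySem.List.slice l (some (a + tb)) (some (a + tb + tb)))
              (PySem.List.pyRange 0 ((l.length : Int) - tb) tb)
            = List.flatMap (fun i => PySem.List.slice (l.drop tb.toNat) (some i) (some (i + tb)))
              (PySem.List.pyRange 0 ((l.length : Int) - tb) tb) := by
        apply List.flatMap_congr
        intro x hx
        have hx0 : 0 ≤ x := by
          have := (PySem.List.mem_pyRange_iff_of_pos (show (0:Int) < tb by omega) x).mp hx
          omega
        exact slice_drop_shift l x tb hx0 (by omega)
      rw [hcongr]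
      have hrange :
          PySem.List.pyRange 0 ((l.length : Int) - tb) tb
            = PySem.List.pyRange 0 ((l.drop tb.toNat).length : Int) tb := by
        rcases Decidable.em (tb ≤ (l.length : Int)) with h | h
        · congr 1
          simp [List.length_drop]
          omega
        · rw [pyRange_pos_nil _ _ _ (by omega) (by omega),
            pyRange_pos_nil _ _ _ (by omega) (by simp [List.length_drop]; omega)]
      rw [hrange]
      rw [ih (l.drop tb.toNat).length (by simp [List.length_drop]; omega) _ rfl]
      rw [PySem.List.slice_zero_start, PySem.List.slice_to _ (by omega)]
      exact List.take_append_drop _ _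

-- ===== VERDICT (by name: the statement is the Claim_ definition above) =====
theorem decrypter_approx_spec : Claim_equal_decrypter_approx := by
  intro texte cle tb _ hpre
  obtain ⟨hcle, htb⟩ := hpre
  unfold Spec_decrypter_approx decrypter_approx decrypter_approx_alt
  apply congrArg
  have hbody : ∀ (bl : List String) (v : Int),
      (match pvFreqSearch v cle with
        | some lettre => bl ++ [lettre]
        | none => bl ++ ["?"])
        = bl ++ [pvAltChar (PySem.Int.floordiv v cle)] := by
    intro bl v
    rw [← pvFreq_eq_closed v cle]
    cases pvFreqSearch v cle <;> rfl
  simp only [hbody]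
  simp only [PySem.List.foldl_append_singleton_eq_map, List.nil_append]
  simp only [PySem.List.foldl_append_eq_flatMap, List.nil_append]
  rw [← List.map_flatMap]
  rw [pvChunks_flat tb htb texte]
  apply List.map_congr_left
  intro v _
  rfl
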